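-- pv_equiv track=rewrite | github.com/dahlkkim9-kgs/spark-sql-optimizer | backend/core/formatter.py | _remove_middle_blank_lines
-- ===== SOURCE A (Python) =====
-- def _remove_middle_blank_lines(sql: str) -> str:
--     """去除中间的无意义空行，但保留整段前后的空行"""
--     lines = sql.split('\n')
--
--     # 找到第一个非空行和最后一个非空行
--     first_non_empty = 0
--     last_non_empty = len(lines) - 1
--
--     while first_non_empty < len(lines) and not lines[first_non_empty].strip():
--         first_non_empty += 1
--
--     while last_non_empty >= 0 and not lines[last_non_empty].strip():
--         last_non_empty -= 1
--
--     # 如果全是空行，直接返回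
--     if first_non_empty >= len(lines):
--         return sql
--
--     # 处理中间部分：去除空行
--     result = []
--
--     # 保留开头的空行
--     for i in range(first_non_empty):
--         result.append(lines[i])
--
--     # 中间部分去除空行
--     for i in range(first_non_empty, last_non_empty + 1):
--         if lines[i].strip():  # 只保留非空行
--             result.append(lines[i])
--
--     # 保留结尾的空行
--     for i in range(last_non_empty + 1, len(lines)):
--         result.append(lines[i])
--
--     return '\n'.join(result)
-- ===== SOURCE B (Python) =====
-- def _remove_middle_blank_lines(sql: str) -> str:
--     """去除中间的无意义空行，但保留整段前后的空行"""
--     lines = sql.split('\n')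
--
--     # no content at all: nothing to do
--     if not any(l.strip() for l in lines):
--         return sql
--
--     # single pass: buffer each run of blank lines; a run is emitted only if it
--     # is the leading run (no content seen yet) or the trailing run (end of input)
--     result, pending, seen = [], [], False
--     for line in lines:
--         if line.strip():
--             if not seen:
--                 result += pending  # leading blanks
--             result.append(line)
--             pending = []
--             seen = True
--         else:
--             pending.append(line)
--     return '\n'.join(result + pending)  # pending now holds the trailing blanks
-- ===== Notes on version B (the rewrite author's own statement) =====
-- stated objective: alternative
-- what changed: Replaces A's boundary computation (two index-walking while loops to find the first/last non-blank line, then three index-range for loops) with a single streaming pass that buffers each run of blank lines and emits a run only when it is the leading run or the trailing run.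
import Mathlib
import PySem

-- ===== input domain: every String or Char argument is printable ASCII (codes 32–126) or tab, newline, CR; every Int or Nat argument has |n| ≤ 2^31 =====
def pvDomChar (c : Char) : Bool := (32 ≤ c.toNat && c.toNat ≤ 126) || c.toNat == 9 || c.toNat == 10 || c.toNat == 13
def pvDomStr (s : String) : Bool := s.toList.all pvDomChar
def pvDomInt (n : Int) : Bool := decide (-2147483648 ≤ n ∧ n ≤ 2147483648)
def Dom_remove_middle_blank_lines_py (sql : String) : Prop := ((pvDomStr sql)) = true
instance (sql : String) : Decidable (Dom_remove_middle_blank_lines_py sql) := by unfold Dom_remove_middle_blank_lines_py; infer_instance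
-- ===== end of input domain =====

-- B replaces A's boundary-index scans with a single streaming pass that buffers each
-- run of blank lines and emits a run only at the leading or trailing position; objective: alternative.

-- ===== PORT A =====

-- while first_non_empty < len(lines) and not lines[first_non_empty].strip(): first_non_empty += 1
def pvAFirst (lines : List String) (i : Nat) : Nat :=
  if h : i < lines.length then
    if PySem.Str.strip (lines.getD i "") = "" then pvAFirst lines (i + 1) else i
  else i
termination_by lines.length - i

-- while last_non_empty >= 0 and not lines[last_non_empty].strip(): last_non_empty -= 1
-- (counted by k = last_non_empty + 1 so the countdown is structural; the loop's last is k - 1)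
def pvALastN (lines : List String) : Nat → Nat
  | 0 => 0
  | k + 1 => if PySem.Str.strip (lines.getD k "") = "" then pvALastN lines k else k + 1

def remove_middle_blank_lines_py (sql : String) : String :=
  -- sql.split('\n'): sep "\n" ≠ "", so split? is always some here and getD [] is exact
  let lines := (PySem.Str.split? sql "\n").getD []
  let first_non_empty := pvAFirst lines 0
  let last : Int := (pvALastN lines lines.length : Int) - 1
  if first_non_empty ≥ lines.length then sql
  else
    let result : List String := []
    let result := (PySem.List.pyRange 0 (first_non_empty : Int) 1).foldl
      (fun acc i => acc ++ [PySem.List.pyGetD lines i ""]) result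
    let result := (PySem.List.pyRange (first_non_empty : Int) (last + 1) 1).foldl
      (fun acc i => if ¬ (PySem.Str.strip (PySem.List.pyGetD lines i "") = "")
                    then acc ++ [PySem.List.pyGetD lines i ""] else acc) result
    let result := (PySem.List.pyRange (last + 1) (lines.length : Int) 1).foldl
      (fun acc i => acc ++ [PySem.List.pyGetD lines i ""]) result
    PySem.Str.join "\n" result

-- ===== PORT B =====

-- the body of B's single for-loop: state (result, pending, seen)
def pvBStep (st : List String × List String × Bool) (line : String) :
    List String × List String × Bool :=
  if ¬ (PySem.Str.strip line = "") then
    ((if ¬ st.2.2 then st.1 ++ st.2.1 else st.1) ++ [line], [], true)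
  else (st.1, st.2.1 ++ [line], st.2.2)

def remove_middle_blank_lines_py_alt (sql : String) : String :=
  let lines := (PySem.Str.split? sql "\n").getD []
  -- if not any(l.strip() for l in lines): return sql
  if !(lines.any fun l => !(PySem.Str.strip l == "")) then sql
  else
    let st := lines.foldl pvBStep ([], [], false)
    PySem.Str.join "\n" (st.1 ++ st.2.1)

-- ===== PRECONDITION & SPEC =====
def Spec_remove_middle_blank_lines_py (sql : String) (out : String) : Prop := out = remove_middle_blank_lines_py_alt sql
instance (sql : String) (out : String) : Decidable (Spec_remove_middle_blank_lines_py sql out) := by unfold Spec_remove_middle_blank_lines_py; infer_instance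

-- ===== CLAIM (what is proved, stated in full; the proofs are below) =====
def Claim_equal_remove_middle_blank_lines_py : Prop := ∀ (sql : String), Dom_remove_middle_blank_lines_py sql → Spec_remove_middle_blank_lines_py sql (remove_middle_blank_lines_py sql)

-- ===== LEMMAS AND PROOFS =====

-- 'not l.strip()': a line whose strip is empty (proof-side abbreviation)
def pvBlank (l : String) : Bool := PySem.Str.strip l == ""

-- A's first scan lands just past the blank prefix of the lines from index i on
theorem pvAFirst_eq (lines : List String) (i : Nat) :
    pvAFirst lines i = i + ((lines.drop i).takeWhile pvBlank).length := by
  induction i using pvAFirst.induct lines with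
  | case1 i h hb ih =>
      rw [pvAFirst, dif_pos h, if_pos hb, ih]
      rw [List.drop_eq_getElem_cons h, List.takeWhile_cons, show pvBlank lines[i] = true by
        simp only [pvBlank, beq_iff_eq]; simpa [List.getD, h] using hb]
      simp; omega
  | case2 i h hb =>
      rw [pvAFirst, dif_pos h, if_neg hb]
      rw [List.drop_eq_getElem_cons h, List.takeWhile_cons, show pvBlank lines[i] = false by
        simp only [pvBlank, beq_eq_false_iff_ne, ne_eq]; simpa [List.getD, h] using hb]
      simp
  | case3 i h =>
      rw [pvAFirst, dif_neg h]
      rw [List.drop_eq_nil_of_le (by omega)]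
      simp

-- A's backward scan: k minus the blank suffix length of the first k lines
theorem pvALastN_eq (lines : List String) (k : Nat) (hk : k ≤ lines.length) :
    pvALastN lines k = k - (((lines.take k).reverse).takeWhile pvBlank).length := by
  induction k with
  | zero => simp [pvALastN]
  | succ k ih =>
      have hlt : k < lines.length := by omega
      rw [pvALastN]
      have htk : lines.take (k+1) = lines.take k ++ [lines[k]] := List.take_succ_eq_append_getElem hlt
      rw [htk, List.reverse_append, List.reverse_singleton, List.singleton_append]
      by_cases hb : PySem.Str.strip (lines.getD k "") = ""
      · have hbb : pvBlank lines[k] = true := by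
          simp only [pvBlank, beq_iff_eq]; simpa [List.getD, hlt] using hb
        rw [if_pos hb, ih (by omega), List.takeWhile_cons_of_pos hbb]
        simp only [List.length_cons]
        have : (((lines.take k).reverse).takeWhile pvBlank).length ≤ k := by
          have h1 := (List.takeWhile_prefix (l := (lines.take k).reverse) pvBlank).length_le
          simpa [List.length_reverse, List.length_take, Nat.min_eq_left (le_of_lt hlt)] using h1
        omega
      · have hbb : ¬ pvBlank lines[k] = true := by
          simp only [pvBlank, beq_iff_eq]; simpa [List.getD, hlt] using hb
        rw [if_neg hb, List.takeWhile_cons_of_neg hbb]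
        simp

-- an index loop 'for i in range(a, b)' over in-range indices reads the segment (take b).drop a
theorem pv_map_range (L : List String) (a b : Nat) (hab : a ≤ b) (hb : b ≤ L.length) :
    (PySem.List.pyRange (a : Int) (b : Int) 1).map (fun j => PySem.List.pyGetD L j "") =
      (L.take b).drop a := by
  apply List.ext_getElem
  · simp [PySem.List.length_pyRange_one, List.length_drop, List.length_take]
    omega
  · intro k h1 h2
    have hk : k < b - a := by
      have := PySem.List.length_pyRange_one (a:Int) (b:Int)
      simp at h1
      omega
    simp only [List.getElem_map]
    rw [PySem.List.getElem_pyRange_one]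
    have hidx : a + k < L.length := by omega
    rw [show ((a:Int) + k) = ((a + k : Nat) : Int) by push_cast; ring]
    rw [PySem.List.pyGetD_natCast]
    simp [List.getElem?_eq_getElem hidx, List.getElem_drop, List.getElem_take]

-- the line at the end of the blank prefix is not blank
theorem pv_takeWhile_getElem_false {α : Type} (p : α → Bool) (l : List α)
    (h : (l.takeWhile p).length < l.length) : p (l[(l.takeWhile p).length]'h) = false := by
  induction l with
  | nil => simp at h
  | cons a l ih =>
      by_cases hp : p a = true
      · simp only [List.takeWhile_cons_of_pos hp] at h ⊢
        simpa using ih (by simpa using h)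
      · simp only [List.takeWhile_cons_of_neg hp]
        simpa using eq_false_of_ne_true hp

-- when a non-blank line exists, the trailing blank block ends after the first non-blank line
theorem pv_trailing_lt (L : List String) (h : (L.takeWhile pvBlank).length < L.length) :
    (List.takeWhile pvBlank L.reverse).length < L.length - (L.takeWhile pvBlank).length := by
  set f := (L.takeWhile pvBlank).length with hf
  set t := (List.takeWhile pvBlank L.reverse).length with ht
  have hnb : pvBlank (L[f]'h) = false := pv_takeWhile_getElem_false pvBlank L h
  by_contra hc
  push Not at hc
  have hidx' : L.length - 1 - f < (List.takeWhile pvBlank L.reverse).length := by omega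
  have hmem : (List.takeWhile pvBlank L.reverse)[L.length - 1 - f]'hidx' ∈ List.takeWhile pvBlank L.reverse :=
    List.getElem_mem _
  have hblank := List.mem_takeWhile_imp hmem
  rw [(List.takeWhile_prefix pvBlank).getElem hidx'] at hblank
  rw [List.getElem_reverse] at hblank
  have hEq : L.length - 1 - (L.length - 1 - f) = f := by omega
  simp only [hEq] at hblank
  rw [hnb] at hblank
  exact absurd hblank (by simp)

-- takeWhile over an append whose first part is all-true
theorem pv_takeWhile_append_all {α : Type} (p : α → Bool) (xs ys : List α)
    (h : ∀ x ∈ xs, p x = true) : (xs ++ ys).takeWhile p = xs ++ ys.takeWhile p := by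
  induction xs with
  | nil => simp
  | cons a l ih =>
      simp only [List.cons_append, List.takeWhile_cons_of_pos (h a (by simp))]
      rw [ih (fun x hx => h x (by simp [hx]))]

-- takeWhile over an append whose first part contains a false element
theorem pv_takeWhile_append_stop {α : Type} (p : α → Bool) (xs ys : List α)
    (h : ∃ x ∈ xs, p x = false) : (xs ++ ys).takeWhile p = xs.takeWhile p := by
  induction xs with
  | nil => rcases h with ⟨x, hx, _⟩; simp at hx
  | cons a l ih =>
      by_cases hp : p a = true
      · simp only [List.cons_append, List.takeWhile_cons_of_pos hp]
        rcases h with ⟨x, hx, hxf⟩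
        rcases List.mem_cons.mp hx with rfl | hx'
        · rw [hp] at hxf; cases hxf
        · rw [ih ⟨x, hx', hxf⟩]
      · simp only [List.cons_append, List.takeWhile_cons_of_neg hp]

-- the trailing blank block (reverse take-while, reversed) of line :: rest
theorem pv_tb_cons_of_ex (line : String) (rest : List String)
    (h : ∃ x ∈ rest, pvBlank x = false) :
    (((line :: rest).reverse).takeWhile pvBlank).reverse = ((rest.reverse).takeWhile pvBlank).reverse := by
  have : (line :: rest).reverse = rest.reverse ++ [line] := by simp
  rw [this, pv_takeWhile_append_stop pvBlank rest.reverse [line]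
    (by rcases h with ⟨x, hx, hxf⟩; exact ⟨x, by simp [hx], hxf⟩)]

theorem pv_tb_cons_of_all (line : String) (rest : List String)
    (hline : pvBlank line = false) (h : ∀ x ∈ rest, pvBlank x = true) :
    (((line :: rest).reverse).takeWhile pvBlank).reverse = rest := by
  have : (line :: rest).reverse = rest.reverse ++ [line] := by simp
  rw [this, pv_takeWhile_append_all pvBlank rest.reverse [line]
    (fun x hx => h x (List.mem_reverse.mp hx))]
  rw [List.takeWhile_cons_of_neg (by simp [hline])]
  simp

-- B's fold once content has been seen (seen = true)
theorem pv_foldT (L : List String) (r p : List String) :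
    (L.foldl pvBStep (r, p, true)).1 ++ (L.foldl pvBStep (r, p, true)).2.1 =
      r ++ (if L.all pvBlank then p ++ L
            else L.filter (fun l => !pvBlank l) ++ ((L.reverse).takeWhile pvBlank).reverse) := by
  induction L generalizing r p with
  | nil => simp
  | cons line rest ih =>
      by_cases hb : PySem.Str.strip line = ""
      · have hbb : pvBlank line = true := by simp [pvBlank, hb]
        rw [List.foldl_cons, show pvBStep (r, p, true) line = (r, p ++ [line], true) from by
          simp [pvBStep, hb]]
        rw [ih r (p ++ [line])]
        by_cases hall : rest.all pvBlank
        · rw [if_pos hall, if_pos (by simp [List.all_cons, hbb, hall])]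
          simp
        · rw [if_neg hall, if_neg (by simp [List.all_cons]; intro _; simpa using hall)]
          rw [List.filter_cons_of_neg (by simp [hbb])]
          rw [pv_tb_cons_of_ex line rest (by
            rcases List.all_eq_true.not.mp hall with h
            push Not at h; rcases h with ⟨x, hx, hxf⟩
            exact ⟨x, hx, by simpa using hxf⟩)]
      · have hbb : pvBlank line = false := by simp [pvBlank, hb]
        rw [List.foldl_cons, show pvBStep (r, p, true) line = (r ++ [line], [], true) from by
          simp [pvBStep, hb]]
        rw [ih (r ++ [line]) []]
        rw [if_neg (show ¬ ((line :: rest).all pvBlank = true) by simp [hbb])]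
        rw [List.filter_cons_of_pos (by simp [hbb])]
        by_cases hall : rest.all pvBlank = true
        · rw [if_pos hall, pv_tb_cons_of_all line rest hbb (fun x hx => List.all_eq_true.mp hall x hx),
              List.filter_eq_nil_iff.mpr (fun x hx => by simp [List.all_eq_true.mp hall x hx])]
          simp
        · have hex : ∃ x ∈ rest, pvBlank x = false := by
            rcases List.all_eq_true.not.mp hall with h
            push Not at h; rcases h with ⟨x, hx, hxf⟩
            exact ⟨x, hx, by simpa using hxf⟩
          rw [if_neg hall, pv_tb_cons_of_ex line rest hex]
          simp

-- B's fold before content has been seen (seen = false, result empty)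
theorem pv_foldF (L : List String) (p : List String) :
    (L.foldl pvBStep ([], p, false)).1 ++ (L.foldl pvBStep ([], p, false)).2.1 =
      if L.all pvBlank then p ++ L
      else p ++ (L.takeWhile pvBlank ++ L.filter (fun l => !pvBlank l) ++ ((L.reverse).takeWhile pvBlank).reverse) := by
  induction L generalizing p with
  | nil => simp
  | cons line rest ih =>
      by_cases hb : PySem.Str.strip line = ""
      · have hbb : pvBlank line = true := by simp [pvBlank, hb]
        rw [List.foldl_cons, show pvBStep ([], p, false) line = ([], p ++ [line], false) from by
          simp [pvBStep, hb]]
        rw [ih (p ++ [line])]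
        by_cases hall : rest.all pvBlank
        · rw [if_pos hall, if_pos (by simp [List.all_cons, hbb, hall])]
          simp
        · rw [if_neg hall, if_neg (by simp [List.all_cons]; intro _; simpa using hall)]
          rw [List.takeWhile_cons_of_pos hbb, List.filter_cons_of_neg (by simp [hbb])]
          rw [pv_tb_cons_of_ex line rest (by
            rcases List.all_eq_true.not.mp hall with h
            push Not at h; rcases h with ⟨x, hx, hxf⟩
            exact ⟨x, hx, by simpa using hxf⟩)]
          simp
      · have hbb : pvBlank line = false := by simp [pvBlank, hb]
        rw [List.foldl_cons, show pvBStep ([], p, false) line = (p ++ [line], [], true) from by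
          simp [pvBStep, hb]]
        rw [pv_foldT rest (p ++ [line]) []]
        rw [if_neg (show ¬ ((line :: rest).all pvBlank = true) by simp [hbb])]
        rw [List.takeWhile_cons_of_neg (by simp [hbb]), List.filter_cons_of_pos (by simp [hbb])]
        by_cases hall : rest.all pvBlank = true
        · rw [if_pos hall, pv_tb_cons_of_all line rest hbb (fun x hx => List.all_eq_true.mp hall x hx),
              List.filter_eq_nil_iff.mpr (fun x hx => by simp [List.all_eq_true.mp hall x hx])]
          simp
        · have hex : ∃ x ∈ rest, pvBlank x = false := by
            rcases List.all_eq_true.not.mp hall with h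
            push Not at h; rcases h with ⟨x, hx, hxf⟩
            exact ⟨x, hx, by simpa using hxf⟩
          rw [if_neg hall, pv_tb_cons_of_ex line rest hex]
          simp

-- core list-level equivalence, stated on an arbitrary line list
theorem pv_core (L : List String) (h : pvAFirst L 0 < L.length) :
    L.take (pvAFirst L 0) ++ ((L.take (pvALastN L L.length)).drop (pvAFirst L 0)).filter (fun l => !pvBlank l) ++ L.drop (pvALastN L L.length)
      = L.takeWhile pvBlank ++ L.filter (fun l => !pvBlank l) ++ (List.takeWhile pvBlank L.reverse).reverse := by
  have hf0 : pvAFirst L 0 = (L.takeWhile pvBlank).length := by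
    simpa using pvAFirst_eq L 0
  have hm0 : pvALastN L L.length = L.length - (List.takeWhile pvBlank L.reverse).length := by
    simpa using pvALastN_eq L L.length le_rfl
  rw [hf0] at h ⊢
  rw [hm0]
  set f := (L.takeWhile pvBlank).length with hf
  set t := (List.takeWhile pvBlank L.reverse).length with ht
  set m := L.length - t with hm
  have hfl : f < L.length := h
  have htf : t < L.length - f := pv_trailing_lt L hfl
  have hfm : f < m := by omega
  have e1 : L.takeWhile pvBlank = L.take f := by
    rw [hf]; exact List.prefix_iff_eq_take.mp (List.takeWhile_prefix pvBlank)
  have e3 : (List.takeWhile pvBlank L.reverse).reverse = L.drop m := by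
    have e3a : List.takeWhile pvBlank L.reverse = L.reverse.take t :=
      List.prefix_iff_eq_take.mp (List.takeWhile_prefix pvBlank)
    have e3b : (L.drop (L.length - t)).reverse = L.reverse.take t := by
      rw [List.reverse_drop]; congr 1; omega
    rw [e3a, ← e3b, List.reverse_reverse, hm]
  have hblank_pre : ∀ x ∈ L.take f, pvBlank x = true := by
    intro x hx; exact List.mem_takeWhile_imp (e1 ▸ hx)
  have hblank_suf : ∀ x ∈ L.drop m, pvBlank x = true := by
    intro x hx
    rw [← e3] at hx
    exact List.mem_takeWhile_imp (List.mem_reverse.mp (by simpa using hx))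
  have e2 : L.filter (fun l => !pvBlank l) = ((L.take m).drop f).filter (fun l => !pvBlank l) := by
    conv_lhs => rw [← List.take_append_drop m L]
    rw [List.filter_append]
    have hsuf : (L.drop m).filter (fun l => !pvBlank l) = [] := by
      rw [List.filter_eq_nil_iff]
      intro x hx; simp [hblank_suf x hx]
    rw [hsuf, List.append_nil]
    conv_lhs => rw [← List.take_append_drop f (L.take m)]
    rw [List.filter_append]
    have hpre : ((L.take m).take f).filter (fun l => !pvBlank l) = [] := by
      rw [List.take_take, Nat.min_eq_left (le_of_lt hfm), List.filter_eq_nil_iff]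
      intro x hx; simp [hblank_pre x hx]
    rw [hpre, List.nil_append]
  rw [e1, e2, e3]

theorem pv_main (sql : String) :
    remove_middle_blank_lines_py sql = remove_middle_blank_lines_py_alt sql := by
  unfold remove_middle_blank_lines_py remove_middle_blank_lines_py_alt
  set L := (PySem.Str.split? sql "\n").getD [] with hL
  simp only []
  have hf0 : pvAFirst L 0 = (L.takeWhile pvBlank).length := by simpa using pvAFirst_eq L 0
  by_cases h : pvAFirst L 0 ≥ L.length
  · -- all lines blank: both sides return sql
    have hTW : L.takeWhile pvBlank = L := by
      apply (List.takeWhile_prefix pvBlank).eq_of_length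
      have := (List.takeWhile_prefix (p := pvBlank) (l := L)).length_le
      omega
    have hall : ∀ x ∈ L, pvBlank x = true := by
      intro x hx
      exact List.mem_takeWhile_imp (hTW ▸ hx)
    have hguard : (!(L.any fun l => !(PySem.Str.strip l == ""))) = true := by
      simp only [Bool.not_eq_eq_eq_not, Bool.not_true, List.any_eq_false]
      intro x hx
      have := hall x hx
      simpa [pvBlank] using this
    rw [if_pos h, if_pos hguard]
  · push Not at h
    have hnb : pvBlank (L[pvAFirst L 0]'h) = false := by
      have := pv_takeWhile_getElem_false pvBlank L (hf0 ▸ h)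
      simp only [hf0]; exact this
    have hguard : (!(L.any fun l => !(PySem.Str.strip l == ""))) = false := by
      simp only [Bool.not_eq_false', List.any_eq_true]
      exact ⟨_, List.getElem_mem h, by simpa [pvBlank] using hnb⟩
    rw [if_neg (by omega), if_neg (by simp [hguard])]
    have hcast : ((pvALastN L L.length : Int) - 1) + 1 = ((pvALastN L L.length : Nat) : Int) := by ring
    rw [hcast]
    have hfm' : (L.takeWhile pvBlank).length < L.length - (List.takeWhile pvBlank L.reverse).length :=
      by have := pv_trailing_lt L (hf0 ▸ h); omega
    have hm0 : pvALastN L L.length = L.length - (List.takeWhile pvBlank L.reverse).length := by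
      simpa using pvALastN_eq L L.length le_rfl
    have hfm : pvAFirst L 0 ≤ pvALastN L L.length := by omega
    have hml : pvALastN L L.length ≤ L.length := by omega
    rw [PySem.List.foldl_append_ite (p := fun i => ¬ (PySem.Str.strip (PySem.List.pyGetD L i "") = ""))
        (f := fun i => PySem.List.pyGetD L i "")]
    rw [PySem.List.foldl_append_singleton_eq_map, PySem.List.foldl_append_singleton_eq_map]
    simp only [List.nil_append]
    have hmapfilter :
        (List.filter (fun i => decide (¬ PySem.Str.strip (PySem.List.pyGetD L i "") = ""))
            (PySem.List.pyRange (pvAFirst L 0 : Int) (pvALastN L L.length : Int) 1)).map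
            (fun i => PySem.List.pyGetD L i "") =
          ((PySem.List.pyRange (pvAFirst L 0 : Int) (pvALastN L L.length : Int) 1).map
            (fun i => PySem.List.pyGetD L i "")).filter (fun l => !pvBlank l) := by
      rw [List.filter_map]
      apply congrArg
      apply List.filter_congr
      intro i _
      by_cases hx : PySem.Str.strip (PySem.List.pyGetD L i "") = "" <;>
        simp [pvBlank, hx, Function.comp]
    rw [hmapfilter]
    have h0 : ((0 : Int)) = ((0 : Nat) : Int) := by simp
    rw [h0, pv_map_range L 0 (pvAFirst L 0) (Nat.zero_le _) (le_of_lt h)]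
    rw [pv_map_range L (pvAFirst L 0) (pvALastN L L.length) hfm hml]
    rw [pv_map_range L (pvALastN L L.length) L.length hml le_rfl]
    simp only [List.drop_zero, List.take_length]
    rw [pv_foldF L []]
    rw [if_neg (by
      simp only [List.all_eq_true]
      intro hc
      exact absurd (hc _ (List.getElem_mem h)) (by simp [hnb]))]
    simp only [List.nil_append]
    exact congrArg (PySem.Str.join "\n") (pv_core L h)

-- ===== VERDICT (by name: the statement is the Claim_ definition above) =====
theorem remove_middle_blank_lines_py_spec : Claim_equal_remove_middle_blank_lines_py := by
  intro sql _
  unfold Spec_remove_middle_blank_lines_py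
  exact pv_main sql
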